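-- pv_equiv track=rewrite | github.com/jamesbarber6406/jimmy-jabs-7-score-tracker | app.py | jj_points_skipping_from_groups
-- ===== SOURCE A (Python) =====
-- def jj_points_skipping_from_groups(groups, n_players):
--     """Two tie for 1st => both get 9, next gets 7 (skipped placements)."""
--     pts = {p: 0 for grp in groups for p in grp}
--     place = 1
--     for grp in groups:
--         jj_for_place = n_players - (place - 1)
--         for p in grp:
--             pts[p] = jj_for_place
--         place += len(grp)
--     return pts
-- ===== SOURCE B (Python) =====
-- def jj_points_skipping_from_groups(groups, n_players):
--     """Two tie for 1st => both get 9, next gets 7 (skipped placements)."""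
--     sizes = [len(g) for g in groups]
--     offsets = [sum(sizes[:i]) for i in range(len(groups))]
--     return {p: n_players - off for off, grp in zip(offsets, groups) for p in grp}
-- ===== Notes on version B (the rewrite author's own statement) =====
-- stated objective: alternative
-- what changed: Replaces A's zero-initialisation dict pass plus a threaded running `place` accumulator with an up-front offsets table (prefix sums of group sizes) and a single dict comprehension over zip(offsets, groups).
import Mathlib
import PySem

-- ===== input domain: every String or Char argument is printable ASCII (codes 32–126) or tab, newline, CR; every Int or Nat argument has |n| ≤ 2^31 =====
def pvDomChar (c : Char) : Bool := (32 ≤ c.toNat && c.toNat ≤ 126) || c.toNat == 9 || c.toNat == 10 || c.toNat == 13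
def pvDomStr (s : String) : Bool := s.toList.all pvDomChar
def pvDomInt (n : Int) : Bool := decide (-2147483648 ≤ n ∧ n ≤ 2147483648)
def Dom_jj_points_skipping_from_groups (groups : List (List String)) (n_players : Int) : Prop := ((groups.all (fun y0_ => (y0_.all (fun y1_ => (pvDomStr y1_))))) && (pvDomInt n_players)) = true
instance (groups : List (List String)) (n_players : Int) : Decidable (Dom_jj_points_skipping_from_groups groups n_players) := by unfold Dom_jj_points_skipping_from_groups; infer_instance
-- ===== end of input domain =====

-- B replaces A's zero-initialisation pass + threaded running `place` accumulator with an
-- up-front offsets table (prefix sums of group sizes) and a single comprehension-style pass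
-- over zip(offsets, groups) (objective: alternative decomposition, same cost).


-- ===== PORT A =====
def jj_points_skipping_from_groups (groups : List (List String)) (n_players : Int) : List (String × Int) :=
  -- pts = {p: 0 for grp in groups for p in grp}
  let pts : PySem.Dict String Int :=
    groups.foldl (fun d grp => grp.foldl (fun d p => d.insert p 0) d) PySem.Dict.empty
  -- place = 1; for grp in groups: …; place += len(grp)
  let st :=
    groups.foldl
      (fun (st : PySem.Dict String Int × Int) grp =>
        let jj_for_place := n_players - (st.2 - 1)
        (grp.foldl (fun d p => d.insert p jj_for_place) st.1, st.2 + (grp.length : Int)))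
      (pts, 1)
  st.1.items

-- ===== PORT B =====
def jj_points_skipping_from_groups_alt (groups : List (List String)) (n_players : Int) : List (String × Int) :=
  -- sizes = [len(g) for g in groups]
  let sizes : List Int := groups.map (fun g => (g.length : Int))
  -- offsets = [sum(sizes[:i]) for i in range(len(groups))]
  let offsets : List Int := (List.range groups.length).map (fun i => (sizes.take i).sum)
  -- {p: n_players - off for off, grp in zip(offsets, groups) for p in grp}
  ((offsets.zip groups).foldl
      (fun (d : PySem.Dict String Int) og =>
        og.2.foldl (fun d p => d.insert p (n_players - og.1)) d)
      PySem.Dict.empty).items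

-- ===== PRECONDITION & SPEC =====
def Spec_jj_points_skipping_from_groups (groups : List (List String)) (n_players : Int) (out : List (String × Int)) : Prop := out = jj_points_skipping_from_groups_alt groups n_players
instance (groups : List (List String)) (n_players : Int) (out : List (String × Int)) : Decidable (Spec_jj_points_skipping_from_groups groups n_players out) := by unfold Spec_jj_points_skipping_from_groups; infer_instance

-- ===== CLAIM (what is proved, stated in full; the proofs are below) =====
def Claim_equal_jj_points_skipping_from_groups : Prop := ∀ (groups : List (List String)) (n_players : Int), Dom_jj_points_skipping_from_groups groups n_players → Spec_jj_points_skipping_from_groups groups n_players (jj_points_skipping_from_groups groups n_players)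

-- ===== LEMMAS AND PROOFS =====

/-- Insert a list of (key, value) pairs left to right. -/
def pvIns (d : PySem.Dict String Int) (L : List (String × Int)) : PySem.Dict String Int :=
  L.foldl (fun d pv => d.insert pv.1 pv.2) d

/-- The assignment list: each player of group `i` paired with `n - offset_i`. -/
def pvAssign (n : Int) : List (List String) → Int → List (String × Int)
  | [], _ => []
  | g :: gs, off => g.map (fun p => (p, n - off)) ++ pvAssign n gs (off + (g.length : Int))

theorem pvIns_append (d : PySem.Dict String Int) (L1 L2 : List (String × Int)) :
    pvIns d (L1 ++ L2) = pvIns (pvIns d L1) L2 := by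
  simp [pvIns, List.foldl_append]

theorem pvIns_map_const (d : PySem.Dict String Int) (g : List String) (v : Int) :
    pvIns d (g.map (fun p => (p, v))) = g.foldl (fun d p => d.insert p v) d := by
  simp [pvIns, List.foldl_map]

theorem pvAssign_map_fst (n : Int) (gs : List (List String)) (off : Int) :
    (pvAssign n gs off).map Prod.fst = gs.flatten := by
  induction gs generalizing off with
  | nil => simp [pvAssign]
  | cons g gs ih =>
    have hc : (Prod.fst ∘ fun p : String => (p, n - off)) = id := rfl
    simp [pvAssign, ih, hc]

theorem pv_zeros_eq (gs : List (List String)) (d : PySem.Dict String Int) :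
    gs.foldl (fun d g => g.foldl (fun d p => d.insert p 0) d) d
      = pvIns d (gs.flatten.map (fun p => (p, (0 : Int)))) := by
  induction gs generalizing d with
  | nil => simp [pvIns]
  | cons g gs ih => simp [List.flatten_cons, List.map_append, pvIns_append, pvIns_map_const, ih]

theorem pv_passA_eq (n : Int) (gs : List (List String)) (d : PySem.Dict String Int) (place : Int) :
    (gs.foldl
      (fun (st : PySem.Dict String Int × Int) grp =>
        (grp.foldl (fun d p => d.insert p (n - (st.2 - 1))) st.1, st.2 + (grp.length : Int)))
      (d, place)).1
    = pvIns d (pvAssign n gs (place - 1)) := by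
  induction gs generalizing d place with
  | nil => simp [pvAssign, pvIns]
  | cons g gs ih =>
    simp only [List.foldl_cons, pvAssign, pvIns_append, pvIns_map_const]
    rw [ih]
    have h : place + (g.length : Int) - 1 = place - 1 + (g.length : Int) := by ring
    rw [h]

theorem pv_passB_eq (n : Int) (gs : List (List String)) (c : Int) (d : PySem.Dict String Int) :
    ((((List.range gs.length).map
        (fun i => ((gs.map (fun g => (g.length : Int))).take i).sum + c)).zip gs).foldl
      (fun (d : PySem.Dict String Int) og =>
        og.2.foldl (fun d p => d.insert p (n - og.1)) d) d)
    = pvIns d (pvAssign n gs c) := by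
  induction gs generalizing c d with
  | nil => simp [pvAssign, pvIns]
  | cons g gs ih =>
    rw [List.length_cons, List.range_succ_eq_map, List.map_cons, List.map_map]
    have hmap :
        (List.range gs.length).map
            ((fun i => (((g :: gs).map (fun g => (g.length : Int))).take i).sum + c) ∘ Nat.succ)
          = (List.range gs.length).map
            (fun i => ((gs.map (fun g => (g.length : Int))).take i).sum + (c + (g.length : Int))) := by
      refine List.map_congr_left (fun i _ => ?_)
      simp [List.take_succ_cons]
      ring
    rw [hmap]
    simp only [List.zip_cons_cons, List.foldl_cons, List.take_zero, List.sum_nil, zero_add]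
    rw [ih]
    simp [pvAssign, pvIns_append, pvIns_map_const]

theorem pv_keys_pvIns (d : PySem.Dict String Int) (L : List (String × Int)) :
    (pvIns d L).keys = PySem.Set.update d.keys (L.map Prod.fst) :=
  PySem.Dict.keys_foldl_insert_key L Prod.fst (fun _ pv => pv.2) d

theorem pv_update_ofList_self (xs : List String) :
    PySem.Set.update (PySem.Set.ofList xs) xs = PySem.Set.ofList xs := by
  rw [PySem.Set.update_eq_append_filter]
  have h : (PySem.Set.ofList xs).filter
      (fun y => !(PySem.Set.contains (PySem.Set.ofList xs) y)) = [] := by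
    refine List.filter_eq_nil_iff.mpr (fun a ha => ?_)
    simp only [Bool.not_eq_true', Bool.not_eq_false]
    exact (PySem.Set.contains_iff _ _).2 ha
  rw [h, List.append_nil]

theorem pv_getD_pvIns_not_mem (k : String) (c : Int) (L : List (String × Int))
    (d : PySem.Dict String Int) (h : k ∉ L.map Prod.fst) :
    (pvIns d L).getD k c = d.getD k c := by
  induction L generalizing d with
  | nil => rfl
  | cons pv L ih =>
    simp only [List.map_cons, List.mem_cons, not_or] at h
    show (pvIns (d.insert pv.1 pv.2) L).getD k c = d.getD k c
    rw [ih _ h.2]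
    exact PySem.Dict.getD_insert_of_ne d pv.2 c h.1

theorem pv_getD_pvIns_mem (k : String) (L : List (String × Int)) (h : k ∈ L.map Prod.fst)
    (d d' : PySem.Dict String Int) :
    (pvIns d L).getD k 0 = (pvIns d' L).getD k 0 := by
  induction L generalizing d d' with
  | nil => simp at h
  | cons pv L ih =>
    show (pvIns (d.insert pv.1 pv.2) L).getD k 0 = (pvIns (d'.insert pv.1 pv.2) L).getD k 0
    by_cases hk : k ∈ L.map Prod.fst
    · exact ih hk _ _
    · simp only [List.map_cons, List.mem_cons] at h
      rcases h with h | h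
      · subst h
        rw [pv_getD_pvIns_not_mem _ _ _ _ hk, pv_getD_pvIns_not_mem _ _ _ _ hk,
          PySem.Dict.getD_insert_self, PySem.Dict.getD_insert_self]
      · exact absurd h hk

-- ===== VERDICT (by name: the statement is the Claim_ definition above) =====
theorem jj_points_skipping_from_groups_spec : Claim_equal_jj_points_skipping_from_groups := by
  intro groups n _
  show jj_points_skipping_from_groups groups n = jj_points_skipping_from_groups_alt groups n
  unfold jj_points_skipping_from_groups jj_points_skipping_from_groups_alt
  simp only []
  rw [pv_zeros_eq, pv_passA_eq]
  have hoff : (List.range groups.length).map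
      (fun i => ((groups.map (fun g => (g.length : Int))).take i).sum)
      = (List.range groups.length).map
      (fun i => ((groups.map (fun g => (g.length : Int))).take i).sum + 0) := by
    simp
  rw [hoff, pv_passB_eq]
  have h11 : (1 : Int) - 1 = 0 := by norm_num
  rw [h11]
  set flat := groups.flatten with hflat
  set L := pvAssign n groups 0 with hL
  set L0 := flat.map (fun p => (p, (0 : Int))) with hL0
  have hc0 : (Prod.fst ∘ fun p : String => (p, (0 : Int))) = id := rfl
  have hL0f : L0.map Prod.fst = flat := by simp [hL0, hc0]
  have hLf : L.map Prod.fst = flat := pvAssign_map_fst n groups 0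
  -- keys of the three dicts
  have hk0 : (pvIns PySem.Dict.empty L0).keys = PySem.Set.ofList flat := by
    rw [pv_keys_pvIns, hL0f]
    simp [PySem.Dict.keys_empty, PySem.Set.update_nil_left]
  have hkA : (pvIns (pvIns PySem.Dict.empty L0) L).keys = PySem.Set.ofList flat := by
    rw [pv_keys_pvIns, hk0, hLf, pv_update_ofList_self]
  have hkB : (pvIns PySem.Dict.empty L).keys = PySem.Set.ofList flat := by
    rw [pv_keys_pvIns, hLf]
    simp [PySem.Dict.keys_empty, PySem.Set.update_nil_left]
  have hnA : (pvIns (pvIns PySem.Dict.empty L0) L).keys.Nodup := by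
    rw [hkA]; exact PySem.Set.nodup_ofList _
  have hnB : (pvIns PySem.Dict.empty L).keys.Nodup := by
    rw [hkB]; exact PySem.Set.nodup_ofList _
  rw [PySem.Dict.items_eq_map_keys _ hnA 0, PySem.Dict.items_eq_map_keys _ hnB 0, hkA, hkB]
  refine List.map_congr_left (fun k hk => ?_)
  have hkmem : k ∈ L.map Prod.fst := by
    rw [hLf]; exact (PySem.Set.mem_ofList _ _).1 hk
  rw [pv_getD_pvIns_mem k L hkmem]
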